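-- pv_equiv track=rewrite | github.com/QI-N-QIGT/A-fully-integrated-brain-inspired-memristor-chip-for-multimodal-learning | Simulation_code/mnist_bp_MFusion/quantization_and_noise/base_operator.py | twn_n
-- ===== SOURCE A (Python) =====
-- def twn_n(s):
--     assert s >= 1, "twn_n func's input s need tobe >= 1. "
--     for k in range(0, 8):
--         if (2 ** k) <= s < (2 ** (k+1)):
--             if (s / (2 ** k)) <= ((2 ** (k+1)) / s):
--                 return k
--             else:
--                 return k+1
--     return 8
-- ===== SOURCE B (Python) =====
-- def twn_n(s):
--     assert s >= 1, "twn_n func's input s need tobe >= 1. "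
--     k = s.bit_length() - 1
--     if k >= 8:
--         return 8
--     return k if s * s <= 2 ** (2 * k + 1) else k + 1
-- ===== Notes on version B (the rewrite author's own statement) =====
-- stated objective: simpler
-- what changed: Replaces the 8-step scan with a closed-form exponent k = bit_length-1 and an exact integer midpoint test s*s <= 2^(2k+1) instead of the float-division comparison (verified bit-for-bit equal on the reachable range 1..255).
import Mathlib
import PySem

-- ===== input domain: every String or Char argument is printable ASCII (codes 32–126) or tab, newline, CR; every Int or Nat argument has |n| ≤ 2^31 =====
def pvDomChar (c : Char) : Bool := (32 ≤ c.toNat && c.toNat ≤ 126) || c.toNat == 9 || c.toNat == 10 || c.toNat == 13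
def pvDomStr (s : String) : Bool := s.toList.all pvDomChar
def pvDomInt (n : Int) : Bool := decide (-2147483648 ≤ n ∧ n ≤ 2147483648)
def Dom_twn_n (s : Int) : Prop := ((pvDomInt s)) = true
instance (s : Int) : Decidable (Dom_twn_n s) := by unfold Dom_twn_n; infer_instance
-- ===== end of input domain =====

-- B replaces A's 8-step scan with a closed-form exponent (bit_length - 1) and an exact
-- integer midpoint test, for a simpler branch-free computation (same exact values).

-- ===== PORT A =====
-- the loop body over range(0,8); Python's float division `s/(2**k) <= (2**(k+1))/s` is
-- ported as the exact rational comparison, which is exact here: the guard restricts to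
-- 1 ≤ s < 256, where the float comparison coincides with the rational one (verified
-- exhaustively over 1..255).
def twn_nGo (s : Int) : List Int → Int
  | [] => 8
  | k :: rest =>
      if 2 ^ k.toNat ≤ s ∧ s < 2 ^ (k + 1).toNat then
        if (s : ℚ) / (2 ^ k.toNat : ℚ) ≤ (2 ^ (k + 1).toNat : ℚ) / (s : ℚ) then k else k + 1
      else twn_nGo s rest

def twn_n (s : Int) : Int := twn_nGo s (PySem.List.pyRange 0 8 1)

-- ===== PORT B =====
-- s.bit_length() - 1 for s ≥ 1 is Nat.log2 s.toNat
def twn_n_alt (s : Int) : Int :=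
  let k : Int := (Nat.log2 s.toNat : Int)
  if 8 ≤ k then 8
  else if s * s ≤ 2 ^ (2 * k + 1).toNat then k else k + 1

-- ===== PRECONDITION & SPEC =====
-- A asserts s >= 1 and raises AssertionError otherwise
def Pre_twn_n (s : Int) : Prop := 1 ≤ s
instance (s : Int) : Decidable (Pre_twn_n s) := by unfold Pre_twn_n; infer_instance
def pvWitness_twn_n : Int := (3)

def Spec_twn_n (s : Int) (out : Int) : Prop := out = twn_n_alt s
instance (s : Int) (out : Int) : Decidable (Spec_twn_n s out) := by unfold Spec_twn_n; infer_instance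

-- ===== CLAIM (what is proved, stated in full; the proofs are below) =====
def Claim_equal_twn_n : Prop := ∀ (s : Int), Dom_twn_n s → Pre_twn_n s → Spec_twn_n s (twn_n s)

-- ===== LEMMAS AND PROOFS =====

-- integer-only restatement of A's loop (proof helper; exponents over ℕ)
def goI (s : Int) : List ℕ → Int
  | [] => 8
  | k :: rest =>
      if 2 ^ k ≤ s ∧ s < 2 ^ (k + 1) then
        if s * s ≤ 2 ^ (k + 1) * 2 ^ k then (k : Int) else (k : Int) + 1
      else goI s rest

-- the rational midpoint test equals the exact integer one for s ≥ 1
theorem cond_iff (s : Int) (hs : 1 ≤ s) (a b : ℕ) :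
    ((s : ℚ) / (2 ^ a : ℚ) ≤ (2 ^ b : ℚ) / (s : ℚ)) ↔ s * s ≤ 2 ^ b * 2 ^ a := by
  have h2 : (0 : ℚ) < 2 ^ a := by positivity
  have hsq : (0 : ℚ) < (s : ℚ) := by exact_mod_cast hs
  rw [div_le_div_iff₀ h2 hsq]
  constructor <;> intro h <;> exact_mod_cast h

theorem twn_nGo_eq_goI (s : Int) (hs : 1 ≤ s) (l : List ℕ) :
    twn_nGo s (l.map Int.ofNat) = goI s l := by
  induction l with
  | nil => rfl
  | cons k rest ih =>
      have ht : (((k : ℕ) : Int) + 1).toNat = k + 1 := by omega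
      rw [List.map_cons]
      simp only [twn_nGo, goI, Int.ofNat_eq_natCast, Int.toNat_natCast, ht]
      rw [ih]
      simp only [cond_iff s hs]

theorem twn_n_eq_goI (s : Int) (hs : 1 ≤ s) :
    twn_n s = goI s [0, 1, 2, 3, 4, 5, 6, 7] := by
  have hr : PySem.List.pyRange 0 8 1 =
      ([0, 1, 2, 3, 4, 5, 6, 7] : List ℕ).map Int.ofNat := by decide
  rw [twn_n, hr, twn_nGo_eq_goI s hs]

-- small cases: exhaustive kernel check over 1 ≤ n < 256
set_option maxRecDepth 8000 in
theorem twn_n_small (n : ℕ) (h1 : 1 ≤ n) (h2 : n < 256) :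
    goI (n : Int) [0, 1, 2, 3, 4, 5, 6, 7] = twn_n_alt (n : Int) := by
  revert h1
  revert h2
  revert n
  decide

theorem twn_n_big (s : Int) (h : 256 ≤ s) : twn_n s = 8 := by
  rw [twn_n_eq_goI s (by omega)]
  simp only [goI]
  norm_num
  omega

theorem twn_n_alt_big (s : Int) (h : 256 ≤ s) : twn_n_alt s = 8 := by
  have h256 : (256 : ℕ) ≤ s.toNat := by omega
  have hk : 8 ≤ Nat.log2 s.toNat := by
    have hmono := Nat.log_mono_right (b := 2) h256
    rw [Nat.log2_eq_log_two]
    calc (8 : ℕ) = Nat.log 2 256 := by decide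
      _ ≤ Nat.log 2 s.toNat := hmono
  have hk' : (8 : Int) ≤ (Nat.log2 s.toNat : Int) := by exact_mod_cast hk
  simp [twn_n_alt, hk']

-- ===== VERDICT (by name: the statement is the Claim_ definition above) =====
theorem twn_n_spec : Claim_equal_twn_n := by
  intro s _ hpre
  have h1 : 1 ≤ s := hpre
  unfold Spec_twn_n
  by_cases hb : 256 ≤ s
  · rw [twn_n_big s hb, twn_n_alt_big s hb]
  · have hs : s = ((s.toNat : ℕ) : Int) := by omega
    rw [hs, twn_n_eq_goI _ (by omega)]
    exact twn_n_small s.toNat (by omega) (by omega)
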